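-- pv_equiv track=rewrite | github.com/Hasnain-3764/CO-Assignment | Assembler/assembler.py | binary_conversion_uptofive
-- ===== SOURCE A (Python) =====
-- def binary_conversion_uptofive(s):
--     count=5
--     remainderx=0
--     while count>0:
--         remainder=s%2
--         s=s//2
--         remainderx+=remainder*(2**(5-count))
--         count-=1
--     return remainderx
-- ===== SOURCE B (Python) =====
-- def binary_conversion_uptofive(s):
--     # Closed form: the low five bits of s are exactly s mod 32.
--     return s % 32
-- ===== Notes on version B (the rewrite author's own statement) =====
-- stated objective: simpler
-- what changed: Replaced the 5-iteration bit-peeling loop with the closed form s % 32.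
import Mathlib
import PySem

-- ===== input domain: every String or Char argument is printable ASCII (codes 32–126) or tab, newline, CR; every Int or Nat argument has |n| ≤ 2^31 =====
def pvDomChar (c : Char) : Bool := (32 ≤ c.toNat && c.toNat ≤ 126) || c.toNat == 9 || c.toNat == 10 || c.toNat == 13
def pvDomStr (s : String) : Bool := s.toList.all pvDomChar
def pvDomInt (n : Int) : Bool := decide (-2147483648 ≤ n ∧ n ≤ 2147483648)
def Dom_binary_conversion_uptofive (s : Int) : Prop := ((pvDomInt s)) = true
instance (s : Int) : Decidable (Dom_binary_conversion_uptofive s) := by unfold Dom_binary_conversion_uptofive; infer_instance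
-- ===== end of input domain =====

-- B replaces A's five-step bit-extraction loop with the closed form s % 32 (simpler).

-- ===== PORT A =====
-- while count>0 loop, peeling one bit per iteration
def pvLoopA : Nat → Int → Int → Int
  | 0, _, remainderx => remainderx
  | c + 1, s, remainderx =>
      pvLoopA c (PySem.Int.floordiv s 2)
        (remainderx + PySem.Int.mod s 2 * 2 ^ (5 - (c + 1)))

def binary_conversion_uptofive (s : Int) : Int := pvLoopA 5 s 0

-- ===== PORT B =====
def binary_conversion_uptofive_alt (s : Int) : Int := PySem.Int.mod s 32

-- ===== PRECONDITION & SPEC =====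
def Spec_binary_conversion_uptofive (s : Int) (out : Int) : Prop := out = binary_conversion_uptofive_alt s
instance (s : Int) (out : Int) : Decidable (Spec_binary_conversion_uptofive s out) := by unfold Spec_binary_conversion_uptofive; infer_instance

-- ===== CLAIM (what is proved, stated in full; the proofs are below) =====
def Claim_equal_binary_conversion_uptofive : Prop := ∀ (s : Int), Dom_binary_conversion_uptofive s → Spec_binary_conversion_uptofive s (binary_conversion_uptofive s)

-- ===== LEMMAS AND PROOFS =====

theorem pvLoopA_eq (s : Int) : pvLoopA 5 s 0 = PySem.Int.mod s 32 := by
  simp only [pvLoopA, PySem.Int.mod_eq_emod_of_pos (by norm_num : (0:Int) < 2),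
    PySem.Int.mod_eq_emod_of_pos (by norm_num : (0:Int) < 32),
    PySem.Int.floordiv_eq_ediv_of_pos (by norm_num : (0:Int) < 2)]
  omega

-- ===== VERDICT (by name: the statement is the Claim_ definition above) =====
theorem binary_conversion_uptofive_spec : Claim_equal_binary_conversion_uptofive := by
  intro s _
  unfold Spec_binary_conversion_uptofive binary_conversion_uptofive binary_conversion_uptofive_alt
  exact pvLoopA_eq s
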